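-- pv_equiv track=rewrite | github.com/MarinaKrasnoruzhskaya/first_n_elements | src/utils.py | get_n_elements
-- ===== SOURCE A (Python) =====
-- def get_n_elements(n: int) -> str:
--     """ Функция создает список из n элементов последовательности 122333444455555…
--     и возвращает строку из этих элементов"""
--
--     n_elements = []
--     i = 1
--     elements_to_add = n
--
--     while elements_to_add > 0:
--         if i < elements_to_add:
--             n_elements.extend([str(i)] * i)
--         else:
--             n_elements.extend([str(i)] * elements_to_add)
--         elements_to_add -= i
--         i += 1
--
--     return "".join(n_elements)
-- ===== SOURCE B (Python) =====
-- def get_n_elements(n: int) -> str: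
--     """Closed-boundary rewrite: find the number k of fully completed blocks of the
--     sequence then build the answer branchlessly as the k full blocks
--     plus one partial block."""
--     if n <= 0:
--         return ""
--     k = 0
--     while (k + 1) * (k + 2) <= 2 * n:
--         k += 1
--     return "".join(str(i) * i for i in range(1, k + 1)) + str(k + 1) * (n - k * (k + 1) // 2)
-- ===== Notes on version B (the rewrite author's own statement) =====
-- stated objective: simpler
-- what changed: A interleaves building the output with a subtract-until-empty loop carrying a full/partial branch; B first finds the count k of completed blocks with a tiny arithmetic loop (the largest k whose triangular total does not exceed n) and then builds the answer branchlessly as the k full blocks plus one partial block.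
import Mathlib
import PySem

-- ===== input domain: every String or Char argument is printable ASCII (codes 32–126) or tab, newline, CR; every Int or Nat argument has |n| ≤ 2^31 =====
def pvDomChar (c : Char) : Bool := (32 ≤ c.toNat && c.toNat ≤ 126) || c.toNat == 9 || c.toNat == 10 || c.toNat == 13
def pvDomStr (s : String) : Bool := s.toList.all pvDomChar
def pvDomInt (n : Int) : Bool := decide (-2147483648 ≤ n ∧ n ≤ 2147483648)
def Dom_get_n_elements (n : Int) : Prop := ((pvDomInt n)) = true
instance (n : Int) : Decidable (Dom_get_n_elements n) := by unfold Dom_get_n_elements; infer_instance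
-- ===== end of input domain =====

-- B finds the number k of completed blocks with a tiny arithmetic loop and then builds the
-- k full blocks plus the partial block branchlessly (objective: simpler decomposition, not faster).

-- ===== PORT A =====
-- A's while-loop. The loop variable `i` is carried as `im1 + 1` (in Python it starts at 1 and
-- only increments, so i ≥ 1 throughout), which gives the termination measure `elements_to_add`.
def pvGoA (n_elements : List String) (im1 : Nat) (elements_to_add : Int) : List String :=
  if h : 0 < elements_to_add then
    pvGoA
      (if ((im1 : Int) + 1) < elements_to_add then
        n_elements ++ PySem.List.pyRepeat [PySem.Int.toStr ((im1 : Int) + 1)] ((im1 : Int) + 1)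
       else
        n_elements ++ PySem.List.pyRepeat [PySem.Int.toStr ((im1 : Int) + 1)] elements_to_add)
      (im1 + 1) (elements_to_add - ((im1 : Int) + 1))
  else n_elements
termination_by elements_to_add.toNat
decreasing_by omega

def get_n_elements (n : Int) : String :=
  PySem.Str.join "" (pvGoA [] 0 n)

-- ===== PORT B =====
-- B's `while (k+1)*(k+2) <= 2*n: k += 1` loop.
def pvKLoop (k n : Int) : Int :=
  if (k + 1) * (k + 2) ≤ 2 * n then pvKLoop (k + 1) n else k
termination_by (n - k).toNat
decreasing_by
  have : k < n := by nlinarith [sq_nonneg (2 * k + 1)]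
  omega

-- Python's `str(i) * i` (string repetition) is ported as pyRepeat on the code points — exact.
def get_n_elements_alt (n : Int) : String :=
  if n ≤ 0 then "" else
    PySem.Str.join "" ((PySem.List.pyRange 1 (pvKLoop 0 n + 1) 1).map
        (fun i => String.ofList (PySem.List.pyRepeat (PySem.Int.toChars i) i)))
      ++ String.ofList (PySem.List.pyRepeat (PySem.Int.toChars (pvKLoop 0 n + 1))
          (n - PySem.Int.floordiv (pvKLoop 0 n * (pvKLoop 0 n + 1)) 2))

-- ===== PRECONDITION & SPEC =====
def Spec_get_n_elements (n : Int) (out : String) : Prop := out = get_n_elements_alt n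
instance (n : Int) (out : String) : Decidable (Spec_get_n_elements n out) := by unfold Spec_get_n_elements; infer_instance

-- ===== CLAIM (what is proved, stated in full; the proofs are below) =====
def Claim_equal_get_n_elements : Prop := ∀ (n : Int), Dom_get_n_elements n → Spec_get_n_elements n (get_n_elements n)

-- ===== LEMMAS AND PROOFS =====

-- `pvS im1 m` = number of sequence elements in the m blocks i = im1+1 … im1+m (front-peel form).
def pvS (im1 m : Nat) : Int :=
  match m with
  | 0 => 0
  | Nat.succ m => ((im1 : Int) + 1) + pvS (im1 + 1) m

-- `pvF im1 m` = the list of strings A accumulates over those m full blocks (front-peel form).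
def pvF (im1 m : Nat) : List String :=
  match m with
  | 0 => []
  | Nat.succ m =>
      List.replicate (im1 + 1) (PySem.Int.toStr ((im1 : Int) + 1)) ++ pvF (im1 + 1) m

theorem pvS_nonneg : ∀ (m im1 : Nat), 0 ≤ pvS im1 m := by
  intro m
  induction m with
  | zero => intro im1; simp [pvS]
  | succ m ih => intro im1; have := ih (im1 + 1); simp only [pvS]; positivity

theorem two_pvS : ∀ (m im1 : Nat), 2 * pvS im1 m = 2 * m * im1 + m * (m + 1) := by
  intro m
  induction m with
  | zero => intro im1; simp [pvS]
  | succ m ih =>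
      intro im1
      have h := ih (im1 + 1)
      simp only [pvS]
      push_cast at h ⊢
      ring_nf at h ⊢
      linarith

theorem pvS_succ_back : ∀ (m im1 : Nat), pvS im1 (m + 1) = pvS im1 m + ((im1 : Int) + m + 1) := by
  intro m
  induction m with
  | zero => intro im1; simp [pvS]
  | succ m ih =>
      intro im1
      have h := ih (im1 + 1)
      simp only [pvS] at h ⊢
      push_cast at h ⊢
      linarith

theorem pvF_succ_back : ∀ (m im1 : Nat),
    pvF im1 (m + 1) = pvF im1 m
      ++ List.replicate (im1 + m + 1) (PySem.Int.toStr ((im1 : Int) + m + 1)) := by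
  intro m
  induction m with
  | zero => intro im1; simp [pvF]
  | succ m ih =>
      intro im1
      have h := ih (im1 + 1)
      simp only [pvF] at h ⊢
      rw [h, List.append_assoc]
      have e1 : im1 + 1 + m + 1 = im1 + (m + 1) + 1 := by omega
      have e2 : ((im1 + 1 : Nat) : Int) + m + 1 = (im1 : Int) + ((m + 1 : Nat) : Int) + 1 := by
        push_cast; ring
      rw [e1, e2]

-- the accumulator factors out of A's loop
theorem pvGoA_append_fuel : ∀ (fuel : Nat) (r : Int), r.toNat ≤ fuel → ∀ (im1 : Nat) (acc : List String),
    pvGoA acc im1 r = acc ++ pvGoA [] im1 r := by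
  intro fuel
  induction fuel with
  | zero =>
      intro r hr im1 acc
      rw [pvGoA, pvGoA]
      have h0 : ¬ 0 < r := by omega
      simp only [h0, dif_neg, not_false_iff]
      rw [pvGoA]
      simp [h0]
  | succ f ih =>
      intro r hr im1 acc
      rw [pvGoA]
      conv_rhs => rw [pvGoA]
      by_cases h0 : 0 < r
      · simp only [h0, dif_pos]
        have key := ih (r - ((im1 : Int) + 1)) (by omega) (im1 + 1)
        conv_lhs => rw [key]
        conv_rhs => rw [key]
        by_cases hlt : ((im1 : Int) + 1) < r <;> simp [hlt]
      · simp [h0]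

theorem pvGoA_append : ∀ (r : Int) (im1 : Nat) (acc : List String),
    pvGoA acc im1 r = acc ++ pvGoA [] im1 r :=
  fun r => pvGoA_append_fuel r.toNat r le_rfl

-- closed form of A's loop: m full blocks then a partial block
theorem pvGoA_closed : ∀ (m im1 : Nat) (r : Int),
    pvS im1 m < r → r ≤ pvS im1 (m + 1) →
    pvGoA [] im1 r = pvF im1 m
      ++ List.replicate (r - pvS im1 m).toNat (PySem.Int.toStr ((im1 : Int) + m + 1)) := by
  intro m
  induction m with
  | zero =>
      intro im1 r h1 h2
      simp only [pvS] at h1 h2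
      rw [pvGoA]
      have hnl : ¬ ((im1 : Int) + 1 < r) := by omega
      simp only [h1, dif_pos, hnl, if_false]
      rw [pvGoA]
      have hstop : ¬ (0 < r - ((im1 : Int) + 1)) := by omega
      simp only [hstop, dif_neg, not_false_iff]
      rw [PySem.List.pyRepeat_singleton]
      simp [pvF, pvS]
  | succ m ih =>
      intro im1 r h1 h2
      have hS := pvS_nonneg m (im1 + 1)
      have h1' : ((im1 : Int) + 1) + pvS (im1 + 1) m < r := by simpa [pvS] using h1
      have h0 : 0 < r := by omega
      have hlt : ((im1 : Int) + 1) < r := by omega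
      rw [pvGoA]
      simp only [h0, dif_pos, hlt, if_pos]
      rw [pvGoA_append, PySem.List.pyRepeat_singleton]
      have h2' : r - ((im1 : Int) + 1) ≤ pvS (im1 + 1) (m + 1) := by
        have : pvS im1 (m + 1 + 1) = ((im1 : Int) + 1) + pvS (im1 + 1) (m + 1) := rfl
        omega
      rw [ih (im1 + 1) (r - ((im1 : Int) + 1)) (by omega) h2']
      simp only [pvF, pvS]
      have ea : ((im1 : Int) + 1).toNat = im1 + 1 := by omega
      have eb : ((r - ((im1 : Int) + 1)) - pvS (im1 + 1) m).toNat
          = (r - (((im1 : Int) + 1) + pvS (im1 + 1) m)).toNat := by omega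
      have ec : ((im1 + 1 : Nat) : Int) + m + 1 = (im1 : Int) + ((m + 1 : Nat) : Int) + 1 := by
        push_cast; ring
      rw [ea, eb, ec]
      simp [List.append_assoc]

theorem pvKLoop_spec_fuel : ∀ (fuel : Nat) (k n : Int), (n - k).toNat ≤ fuel →
    k * (k + 1) ≤ 2 * n →
    k ≤ pvKLoop k n ∧ pvKLoop k n * (pvKLoop k n + 1) ≤ 2 * n ∧
      2 * n < (pvKLoop k n + 1) * (pvKLoop k n + 2) := by
  intro fuel
  induction fuel with
  | zero =>
      intro k n hf h
      by_cases hg : (k + 1) * (k + 2) ≤ 2 * n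
      · have : k < n := by nlinarith [sq_nonneg (2 * k + 1)]
        omega
      · rw [pvKLoop, if_neg hg]
        exact ⟨le_refl k, h, lt_of_not_ge hg⟩
  | succ f ih =>
      intro k n hf h
      by_cases hg : (k + 1) * (k + 2) ≤ 2 * n
      · rw [pvKLoop, if_pos hg]
        have hlt : k < n := by nlinarith [sq_nonneg (2 * k + 1)]
        obtain ⟨ha, hb, hc⟩ := ih (k + 1) n (by omega) (by linarith)
        exact ⟨by omega, hb, hc⟩
      · rw [pvKLoop, if_neg hg]
        exact ⟨le_refl k, h, lt_of_not_ge hg⟩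

theorem pvKLoop_spec : ∀ (k n : Int), k * (k + 1) ≤ 2 * n →
    k ≤ pvKLoop k n ∧ pvKLoop k n * (pvKLoop k n + 1) ≤ 2 * n ∧
      2 * n < (pvKLoop k n + 1) * (pvKLoop k n + 2) :=
  fun k n => pvKLoop_spec_fuel (n - k).toNat k n le_rfl

theorem join_nil_eq_flatten : ∀ (l : List (List Char)), PySem.Chars.join [] l = l.flatten := by
  intro l
  induction l with
  | nil => simp [PySem.Chars.join_nil]
  | cons p rest ih =>
      cases rest with
      | nil => simp [PySem.Chars.join_singleton]
      | cons q r => rw [PySem.Chars.join_cons_cons, ih]; simp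

-- B's comprehension over range(1, k+1), flattened, is exactly A's m full blocks, flattened
theorem pvRangeBlocks : ∀ (m im1 : Nat),
    (((PySem.List.pyRange ((im1 : Int) + 1) ((im1 : Int) + 1 + m) 1).map
        (fun i => PySem.List.pyRepeat (PySem.Int.toChars i) i))).flatten
      = ((pvF im1 m).map String.toList).flatten := by
  intro m
  induction m with
  | zero =>
      intro im1
      rw [PySem.List.pyRange_one_eq_nil (by push_cast; omega)]
      simp [pvF]
  | succ m ih =>
      intro im1
      rw [PySem.List.pyRange_one_cons (by push_cast; omega)]
      simp only [List.map_cons, List.flatten_cons]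
      have hbounds : PySem.List.pyRange ((im1 : Int) + 1 + 1) ((im1 : Int) + 1 + ((m + 1 : Nat) : Int)) 1
          = PySem.List.pyRange (((im1 + 1 : Nat) : Int) + 1) (((im1 + 1 : Nat) : Int) + 1 + (m : Int)) 1 := by
        have e1 : (im1 : Int) + 1 + 1 = ((im1 + 1 : Nat) : Int) + 1 := by push_cast; ring
        have e2 : (im1 : Int) + 1 + ((m + 1 : Nat) : Int) = ((im1 + 1 : Nat) : Int) + 1 + (m : Int) := by
          push_cast; ring
        rw [e1, e2]
      rw [hbounds, ih (im1 + 1)]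
      simp only [pvF, List.map_append, List.flatten_append]
      congr 1
      simp [PySem.List.pyRepeat, List.map_replicate, PySem.Int.toList_toStr,
        show ((im1 : Int) + 1).toNat = im1 + 1 from by omega]

-- ===== VERDICT (by name: the statement is the Claim_ definition above) =====
theorem get_n_elements_spec : Claim_equal_get_n_elements := by
  intro n _
  unfold Spec_get_n_elements get_n_elements get_n_elements_alt
  by_cases hn : n ≤ 0
  · rw [pvGoA]
    simp only [show ¬ (0 : Int) < n from by omega, dif_neg, not_false_iff, if_pos hn]
    refine String.toList_inj.mp ?_
    simp [PySem.Str.toList_join, PySem.Chars.join_nil]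
  · have hn' : 0 < n := by omega
    simp only [if_neg hn]
    have h00 : (0 : Int) * (0 + 1) ≤ 2 * n := by norm_num; omega
    obtain ⟨hk0, hkl, hku⟩ := pvKLoop_spec 0 n h00
    generalize hg : pvKLoop 0 n = kk at hk0 hkl hku ⊢
    obtain ⟨K, rfl⟩ : ∃ K : Nat, kk = (K : Int) := ⟨kk.toNat, by omega⟩
    have h2S : 2 * pvS 0 K = (K : Int) * ((K : Int) + 1) := by
      have h := two_pvS K 0
      push_cast at h ⊢; linarith
    have h2S' : 2 * pvS 0 (K + 1) = ((K : Int) + 1) * ((K : Int) + 2) := by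
      have h := two_pvS (K + 1) 0
      push_cast at h ⊢; linarith
    have hfd : PySem.Int.floordiv ((K : Int) * ((K : Int) + 1)) 2 = pvS 0 K := by
      rw [← h2S, PySem.Int.floordiv_eq_ediv_of_pos (by norm_num)]
      exact Int.mul_ediv_cancel_left _ (by norm_num)
    have hSn : pvS 0 K ≤ n := by linarith
    have hnS1 : n < pvS 0 (K + 1) := by linarith
    have hA : pvGoA [] 0 n = pvF 0 K
        ++ List.replicate (n - pvS 0 K).toNat
            (PySem.Int.toStr (((0 : Nat) : Int) + (K : Int) + 1)) := by
      rcases lt_or_eq_of_le hSn with hlt | heq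
      · exact pvGoA_closed K 0 n hlt (le_of_lt hnS1)
      · have hK1 : 1 ≤ K := by
          by_contra hc
          have hz : K = 0 := by omega
          rw [hz] at heq; simp [pvS] at heq; omega
        obtain ⟨K', hK'⟩ : ∃ K', K = K' + 1 := ⟨K - 1, by omega⟩
        subst hK'
        have hb := pvS_succ_back K' 0
        have hlow : pvS 0 K' < n := by omega
        have hc := pvGoA_closed K' 0 n hlow (by omega)
        rw [hc, pvF_succ_back]
        have e0 : (n - pvS 0 (K' + 1)).toNat = 0 := by omega
        have e1 : (n - pvS 0 K').toNat = 0 + K' + 1 := by omega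
        rw [e0, e1]
        simp
    have hfull : ((PySem.List.pyRange 1 ((K : Int) + 1) 1).map
        (fun i => PySem.List.pyRepeat (PySem.Int.toChars i) i)).flatten
        = ((pvF 0 K).map String.toList).flatten := by
      have h := pvRangeBlocks K 0
      have e1 : ((0 : Nat) : Int) + 1 = 1 := by norm_num
      rw [e1, show (1 : Int) + (K : Int) = (K : Int) + 1 from by ring] at h
      exact h
    refine String.toList_inj.mp ?_
    rw [hA]
    have hemp : "".toList = ([] : List Char) := by decide
    simp only [String.toList_append, PySem.Str.toList_join, hemp, join_nil_eq_flatten,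
      List.map_map, List.map_append, Function.comp_def, String.toList_ofList,
      List.map_replicate, PySem.Int.toList_toStr, List.flatten_append]
    congr 1
    · exact hfull.symm
    · rw [hfd]
      simp [PySem.List.pyRepeat]
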